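-- pv_equiv track=rewrite | github.com/SiyuanHuangSJTU/ShareWithServer_JiayueZHOU | test.py | get_proof_list
-- ===== SOURCE A (Python) =====
-- import copy
--
-- def inverse01(v01):
--     if v01 == 0:
--         return 1
--     else:
--         return 0
--
-- def get_proof_list(binlist):
--     proof_list = []
--     for _ in range(len(binlist)):
--         if _ == 0:
--             proof_list.append([inverse01(binlist[_])])
--         else:
--             tmp = copy.copy(binlist[:_])
--             tmp.append(inverse01(binlist[_]))
--             proof_list.append(tmp)
--     return proof_list
-- ===== SOURCE B (Python) =====
-- def get_proof_list(binlist):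
--     # Recursive: rows of x::xs are [flip x] followed by the rows of xs
--     # each with x prepended.
--     if not binlist:
--         return []
--     x, xs = binlist[0], binlist[1:]
--     first = [1 if x == 0 else 0]
--     return [first] + [[x] + row for row in get_proof_list(xs)]
-- ===== Notes on version B (the rewrite author's own statement) =====
-- stated objective: alternative
-- what changed: Replaces A's index loop with per-step slicing (and its i==0 special case) by structural recursion on the head: recurse on the tail and prepend the head element to every row of the recursive result.
import Mathlib
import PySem

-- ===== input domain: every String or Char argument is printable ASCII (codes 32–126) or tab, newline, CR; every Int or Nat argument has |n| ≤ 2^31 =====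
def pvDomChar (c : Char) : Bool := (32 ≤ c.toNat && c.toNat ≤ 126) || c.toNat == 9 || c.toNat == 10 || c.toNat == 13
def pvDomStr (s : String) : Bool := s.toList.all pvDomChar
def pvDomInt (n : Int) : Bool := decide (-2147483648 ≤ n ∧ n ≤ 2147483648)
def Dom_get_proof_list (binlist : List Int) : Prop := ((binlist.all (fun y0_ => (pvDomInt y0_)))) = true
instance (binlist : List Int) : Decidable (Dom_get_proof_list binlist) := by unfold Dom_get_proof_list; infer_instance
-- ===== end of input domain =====

-- B replaces A's index loop with per-step slicing (and its i==0 special case) by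
-- structural recursion on the head, prepending it to every recursive row; objective: alternative.

-- ===== PORT A =====
def inverse01 (v01 : Int) : Int := if v01 == 0 then 1 else 0

def get_proof_list (binlist : List Int) : List (List Int) :=
  (PySem.List.pyRange 0 (binlist.length : Int) 1).foldl
    (fun proof_list i =>
      if i == 0 then
        proof_list ++ [[inverse01 (PySem.List.pyGetD binlist i 0)]]
      else
        proof_list ++ [PySem.List.slice binlist none (some i) ++
                       [inverse01 (PySem.List.pyGetD binlist i 0)]])
    []

-- ===== PORT B =====
def get_proof_list_alt : List Int → List (List Int)
  | [] => []
  | x :: xs =>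
      [if x == 0 then (1 : Int) else 0] ::
        (get_proof_list_alt xs).map (fun row => x :: row)

-- ===== PRECONDITION & SPEC =====
def Spec_get_proof_list (binlist : List Int) (out : List (List Int)) : Prop := out = get_proof_list_alt binlist
instance (binlist : List Int) (out : List (List Int)) : Decidable (Spec_get_proof_list binlist out) := by unfold Spec_get_proof_list; infer_instance

-- ===== CLAIM (what is proved, stated in full; the proofs are below) =====
def Claim_equal_get_proof_list : Prop := ∀ (binlist : List Int), Dom_get_proof_list binlist → Spec_get_proof_list binlist (get_proof_list binlist)

-- ===== LEMMAS AND PROOFS =====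

-- B appends one row when the input grows on the right.
theorem alt_snoc (l : List Int) (x : Int) :
    get_proof_list_alt (l ++ [x]) = get_proof_list_alt l ++ [l ++ [inverse01 x]] := by
  induction l with
  | nil => simp [get_proof_list_alt, inverse01]
  | cons y ys ih =>
    simp only [List.cons_append, get_proof_list_alt, ih]
    simp

theorem a_snoc (l : List Int) (x : Int) :
    get_proof_list (l ++ [x]) = get_proof_list l ++ [l ++ [inverse01 x]] := by
  unfold get_proof_list
  have hlen : ((l ++ [x]).length : Int) = (l.length : Int) + 1 := by simp
  rw [hlen, PySem.List.pyRange_one_succ_right (by positivity), List.foldl_append]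
  have hpre : (PySem.List.pyRange 0 (l.length : Int) 1).foldl
      (fun proof_list i =>
        if i == 0 then
          proof_list ++ [[inverse01 (PySem.List.pyGetD (l ++ [x]) i 0)]]
        else
          proof_list ++ [PySem.List.slice (l ++ [x]) none (some i) ++
                         [inverse01 (PySem.List.pyGetD (l ++ [x]) i 0)]]) []
      = (PySem.List.pyRange 0 (l.length : Int) 1).foldl
      (fun proof_list i =>
        if i == 0 then
          proof_list ++ [[inverse01 (PySem.List.pyGetD l i 0)]]
        else
          proof_list ++ [PySem.List.slice l none (some i) ++
                         [inverse01 (PySem.List.pyGetD l i 0)]]) [] := by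
    apply PySem.List.foldl_congr_mem
    intro acc i hi
    rw [PySem.List.mem_pyRange_one] at hi
    have hget : PySem.List.pyGetD (l ++ [x]) i 0 = PySem.List.pyGetD l i 0 := by
      rw [PySem.List.pyGetD_eq_getElem (l ++ [x]) 0 hi.1 (by simp; omega),
          PySem.List.pyGetD_eq_getElem l 0 hi.1 (by exact_mod_cast hi.2),
          List.getElem_append_left]
    have hslice : PySem.List.slice (l ++ [x]) none (some i) = PySem.List.slice l none (some i) := by
      rw [PySem.List.slice_to _ hi.1, PySem.List.slice_to _ hi.1,
          List.take_append_of_le_length (by omega)]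
    simp only [hget, hslice]
  rw [hpre, List.foldl_cons, List.foldl_nil]
  have hget : PySem.List.pyGetD (l ++ [x]) (l.length : Int) 0 = x := by
    rw [PySem.List.pyGetD_natCast]
    simp
  have hslice : PySem.List.slice (l ++ [x]) none (some (l.length : Int)) = l := by
    rw [PySem.List.slice_to _ (by positivity)]
    simp
  by_cases h0 : l = []
  · subst h0; simp
  · have : ¬ (((l.length : Int)) == 0) = true := by
      simp only [beq_iff_eq]
      intro h
      exact h0 (List.eq_nil_of_length_eq_zero (by exact_mod_cast h))
    rw [if_neg this, hget, hslice]

theorem ab_eq (l : List Int) : get_proof_list l = get_proof_list_alt l := by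
  induction l using List.reverseRecOn with
  | nil => rfl
  | append_singleton xs x ih => rw [a_snoc, alt_snoc, ih]

-- ===== VERDICT (by name: the statement is the Claim_ definition above) =====
theorem get_proof_list_spec : Claim_equal_get_proof_list := by
  intro binlist _
  unfold Spec_get_proof_list
  exact ab_eq binlist
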